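-- pv_equiv track=rewrite | github.com/mmistroni/Codility | test/test_pascal_matrix.py | modified_pascal_matrix
-- ===== SOURCE A (Python) =====
-- def modified_pascal_matrix(n):
--     """
--     Generates a modified Pascal's triangle with zeros inserted, for generic Pascal matrix.
--
--     Args:
--       n: The number of rows to generate.
--
--     Returns:
--       A list of lists representing the modified Pascal's triangle.
--     """
--     if n <= 0:
--         return []
--
--     triangle = []
--     if n >= 1:
--         triangle.append([0, 1, 0])
--     if n >= 2:
--         triangle.append([1, 0, 1])
--
--     for i in range(2, n):
--         prev_row = triangle[i - 1]
--         new_row = []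
--         pascal_row = [1] * (i + 1)
--
--         for j in range(1, i):
--             # Boundary checks to prevent IndexError
--             left = prev_row[2 * (j - 1) + 1] if 2 * (j - 1) + 1 < len(prev_row) else 0
--             right = prev_row[2 * j + 1] if 2 * j + 1 < len(prev_row) else 0
--             pascal_row[j] = left + right
--
--         for val in pascal_row:
--             new_row.append(val)
--             new_row.append(0)
--
--         new_row.pop()
--         triangle.append(new_row)
--
--     return triangle
-- ===== SOURCE B (Python) =====
-- def modified_pascal_matrix(n):
--     """Closed-form construction: the interior pascal sums are always 0,
--     so each row beyond the first two is [1] + [0]*(2*i-1) + [1]."""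
--     if n <= 0:
--         return []
--     rows = [[0, 1, 0]]
--     if n >= 2:
--         rows.append([1, 0, 1])
--     for i in range(2, n):
--         rows.append([1] + [0] * (2 * i - 1) + [1])
--     return rows
-- ===== Notes on version B (the rewrite author's own statement) =====
-- stated objective: faster
-- what changed: Replaced the prev-row-dependent pascal recomputation (inner index loop + interleave-with-zeros pass + pop) with direct closed-form row construction [1]+[0]*(2*i-1)+[1], since the interior sums are provably always zero.
import Mathlib
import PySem

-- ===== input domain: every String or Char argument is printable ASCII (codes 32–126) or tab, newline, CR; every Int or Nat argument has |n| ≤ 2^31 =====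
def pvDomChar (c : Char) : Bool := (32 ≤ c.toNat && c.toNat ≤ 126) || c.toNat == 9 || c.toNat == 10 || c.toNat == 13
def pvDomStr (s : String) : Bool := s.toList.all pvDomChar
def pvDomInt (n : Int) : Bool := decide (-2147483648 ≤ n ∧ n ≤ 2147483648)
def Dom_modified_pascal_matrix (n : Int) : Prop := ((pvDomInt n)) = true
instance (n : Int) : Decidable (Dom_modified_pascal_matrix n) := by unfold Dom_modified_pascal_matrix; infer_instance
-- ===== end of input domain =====

-- B replaces A's prev-row pascal recomputation (inner index loop + interleave pass + pop)
-- with direct closed-form rows [1]+[0]*(2*i-1)+[1]; the interior sums are provably always 0.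

-- ===== PORT A =====
-- 'for val in pascal_row: new_row.append(val); new_row.append(0)' as the obvious structural recursion
def pvInterleave : List Int → List Int
  | [] => []
  | v :: rest => v :: 0 :: pvInterleave rest

-- the body of A's outer loop for row i: inner j-loop, interleave-with-zeros pass, pop
-- (pascal_row is a Python list written by index; Array.setIfInBounds is exact here: j is always in range)
def pvStepRow (prev : List Int) (i : Int) : List Int :=
  let pascal0 : Array Int := Array.replicate (i + 1).toNat 1
  let pascal := (PySem.List.pyRange 1 i 1).foldl (fun p j =>
    -- guarded reads: index is nonneg and in range under the guard, so getD is exact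
    let left : Int := if 2 * (j - 1) + 1 < (prev.length : Int) then prev.getD (2 * (j - 1) + 1).toNat 0 else 0
    let right : Int := if 2 * j + 1 < (prev.length : Int) then prev.getD (2 * j + 1).toNat 0 else 0
    p.setIfInBounds j.toNat (left + right)) pascal0
  let newRow := pvInterleave pascal.toList
  newRow.dropLast  -- new_row.pop(): removes the last element (list is nonempty here)

def modified_pascal_matrix (n : Int) : List (List Int) :=
  if n ≤ 0 then [] else
    let tri : List (List Int) := []
    let tri := if n ≥ 1 then tri ++ [[0, 1, 0]] else tri
    let tri := if n ≥ 2 then tri ++ [[1, 0, 1]] else tri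
    -- triangle[i-1]: index always in range (triangle has i rows at that point)
    (PySem.List.pyRange 2 n 1).foldl (fun tri i =>
      tri ++ [pvStepRow (tri.getD (i - 1).toNat []) i]) tri

-- ===== PORT B =====
def pvRow (i : Int) : List Int := [1] ++ List.replicate (2 * i - 1).toNat 0 ++ [1]

def modified_pascal_matrix_alt (n : Int) : List (List Int) :=
  if n ≤ 0 then [] else
    let rows : List (List Int) := [[0, 1, 0]]
    let rows := if n ≥ 2 then rows ++ [[1, 0, 1]] else rows
    rows ++ (PySem.List.pyRange 2 n 1).map pvRow

-- ===== PRECONDITION & SPEC =====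
def Spec_modified_pascal_matrix (n : Int) (out : List (List Int)) : Prop := out = modified_pascal_matrix_alt n
instance (n : Int) (out : List (List Int)) : Decidable (Spec_modified_pascal_matrix n out) := by unfold Spec_modified_pascal_matrix; infer_instance

-- ===== CLAIM (what is proved, stated in full; the proofs are below) =====
def Claim_equal_modified_pascal_matrix : Prop := ∀ (n : Int), Dom_modified_pascal_matrix n → Spec_modified_pascal_matrix n (modified_pascal_matrix n)

-- ===== LEMMAS AND PROOFS =====

-- all odd positions of a row are 0 (out-of-range getD also yields the default 0)
def pvOddZero (l : List Int) : Prop := ∀ k : Nat, l.getD (2 * k + 1) 0 = 0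

theorem pvOddZero_pvRow (i : Int) (hi : 1 ≤ i) : pvOddZero (pvRow i) := by
  intro k
  unfold pvRow
  simp only [List.cons_append, List.nil_append, List.getD_cons_succ]
  rcases Nat.lt_or_ge (2 * k) ((2 * i - 1).toNat) with h | h
  · rw [List.getD_append _ _ _ _ (by simpa using h)]
    rw [List.getD_eq_getElem _ _ (by simpa using h)]
    simp
  · have hlen : ((List.replicate (2 * i - 1).toNat (0 : Int)) ++ [1]).length ≤ 2 * k := by
      simp
      omega
    rw [List.getD_eq_default _ _ hlen]

theorem pvSetFold_length (m : Nat) (p : List Int) :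
    ((List.range m).foldl (fun a k => a.set (k + 1) 0) p).length = p.length := by
  induction m generalizing p with
  | zero => simp
  | succ m ih => simp only [List.range_succ, List.foldl_append, List.foldl_cons, List.foldl_nil,
      List.length_set]; exact ih p

theorem pvSetFold_getElem (m : Nat) (p : List Int) (j : Nat) (hj : j < p.length) :
    ((List.range m).foldl (fun a k => a.set (k + 1) 0) p)[j]'(by rw [pvSetFold_length]; exact hj)
      = if 1 ≤ j ∧ j ≤ m then 0 else p[j] := by
  induction m with
  | zero =>
    simp only [List.range_zero, List.foldl_nil]
    rw [if_neg (by omega)]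
  | succ m ih =>
    simp only [List.range_succ, List.foldl_append, List.foldl_cons, List.foldl_nil]
    simp only [List.getElem_set]
    rcases eq_or_ne (m + 1) j with h | h
    · rw [if_pos h, if_pos (by omega)]
    · rw [if_neg h, ih]
      by_cases h1 : 1 ≤ j ∧ j ≤ m
      · rw [if_pos h1, if_pos ⟨h1.1, by omega⟩]
      · rw [if_neg h1, if_neg (by omega)]

theorem pvFlatMap_replicate (m : Nat) :
    (List.replicate m (0 : Int)).flatMap (fun v => [v, 0]) = List.replicate (2 * m) 0 := by
  induction m with
  | zero => simp
  | succ m ih =>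
    rw [List.replicate_succ, List.flatMap_cons, ih,
      show 2 * (m + 1) = (2 * m) + 1 + 1 by ring, List.replicate_succ, List.replicate_succ]
    rfl

theorem pvInterleave_eq (l : List Int) : pvInterleave l = l.flatMap (fun v => [v, 0]) := by
  induction l with
  | nil => rfl
  | cons x xs ih => simp [pvInterleave, ih]

theorem pvFoldToList (l : List Int) (p : Array Int) :
    (l.foldl (fun (p : Array Int) j => p.setIfInBounds j.toNat 0) p).toList
      = l.foldl (fun (q : List Int) j => q.set j.toNat 0) p.toList := by
  induction l generalizing p with
  | nil => rfl
  | cons x xs ih => simp only [List.foldl_cons, ih, Array.toList_setIfInBounds]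

-- the inner j-loop only writes zeros when the previous row is odd-zero
theorem pvStepRow_eq (prev : List Int) (i : Int) (hi : 2 ≤ i) (hz : pvOddZero prev) :
    pvStepRow prev i = pvRow i := by
  obtain ⟨m, rfl⟩ : ∃ m : Nat, i = (m : Int) + 1 := ⟨(i - 1).toNat, by omega⟩
  have hm : 1 ≤ m := by omega
  unfold pvStepRow
  show (pvInterleave ((PySem.List.pyRange 1 ((m : Int) + 1) 1).foldl (fun p j =>
      let left : Int := if 2 * (j - 1) + 1 < (prev.length : Int) then prev.getD (2 * (j - 1) + 1).toNat 0 else 0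
      let right : Int := if 2 * j + 1 < (prev.length : Int) then prev.getD (2 * j + 1).toNat 0 else 0
      p.setIfInBounds j.toNat (left + right)) (Array.replicate ((m : Int) + 1 + 1).toNat 1)).toList).dropLast
      = pvRow ((m : Int) + 1)
  have hcong : (PySem.List.pyRange 1 ((m : Int) + 1) 1).foldl (fun p j =>
      let left : Int := if 2 * (j - 1) + 1 < (prev.length : Int) then prev.getD (2 * (j - 1) + 1).toNat 0 else 0
      let right : Int := if 2 * j + 1 < (prev.length : Int) then prev.getD (2 * j + 1).toNat 0 else 0
      p.setIfInBounds j.toNat (left + right)) (Array.replicate ((m : Int) + 1 + 1).toNat 1)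
      = (PySem.List.pyRange 1 ((m : Int) + 1) 1).foldl (fun (p : Array Int) j => p.setIfInBounds j.toNat 0)
          (Array.replicate ((m : Int) + 1 + 1).toNat 1) := by
    apply PySem.List.foldl_congr_mem
    intro p j hj
    have hj' : 1 ≤ j ∧ j < (m : Int) + 1 := PySem.List.mem_pyRange_one.mp hj
    have hleft : (if 2 * (j - 1) + 1 < (prev.length : Int) then prev.getD (2 * (j - 1) + 1).toNat 0 else 0) = 0 := by
      split
      · rw [show (2 * (j - 1) + 1).toNat = 2 * (j - 1).toNat + 1 by omega]
        exact hz _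
      · rfl
    have hright : (if 2 * j + 1 < (prev.length : Int) then prev.getD (2 * j + 1).toNat 0 else 0) = 0 := by
      split
      · rw [show (2 * j + 1).toNat = 2 * j.toNat + 1 by omega]
        exact hz _
      · rfl
    simp only [hleft, hright, add_zero]
  rw [hcong]
  have hbridge : ((PySem.List.pyRange 1 ((m : Int) + 1) 1).foldl (fun (p : Array Int) j => p.setIfInBounds j.toNat 0)
      (Array.replicate ((m : Int) + 1 + 1).toNat 1)).toList
      = (PySem.List.pyRange 1 ((m : Int) + 1) 1).foldl (fun (q : List Int) j => q.set j.toNat 0)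
          (List.replicate ((m : Int) + 1 + 1).toNat 1) := by
    rw [pvFoldToList, Array.toList_replicate]
  rw [hbridge]
  have hset : (PySem.List.pyRange 1 ((m : Int) + 1) 1).foldl (fun (p : List Int) j => p.set j.toNat 0)
      (List.replicate ((m : Int) + 1 + 1).toNat 1)
      = (List.range m).foldl (fun (a : List Int) k => a.set (k + 1) 0) (List.replicate (m + 2) 1) := by
    rw [PySem.List.pyRange_one]
    rw [show (((m : Int) + 1) - 1).toNat = m by omega, show ((m : Int) + 1 + 1).toNat = m + 2 by omega]
    rw [List.foldl_map]
    apply PySem.List.foldl_congr_mem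
    intro a k _
    congr 1
    omega
  rw [hset]
  have htarget : (List.range m).foldl (fun (a : List Int) k => a.set (k + 1) 0)
      (List.replicate (m + 2) 1) = 1 :: List.replicate m (0 : Int) ++ [1] := by
    apply List.ext_getElem
    · rw [pvSetFold_length]
      simp
    · intro j h1 h2
      rw [pvSetFold_getElem m _ j (by rw [pvSetFold_length] at h1; exact h1)]
      by_cases hj0 : j = 0
      · subst hj0
        rw [if_neg (by omega)]
        simp
      · by_cases hjm : j ≤ m
        · rw [if_pos ⟨by omega, hjm⟩]
          obtain ⟨jj, rfl⟩ : ∃ jj, j = jj + 1 := ⟨j - 1, by omega⟩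
          have hjj : jj < m := by omega
          simp [hjj]
        · have hj2 : j = m + 1 := by
            have := h2
            simp at this
            omega
          subst hj2
          rw [if_neg (by omega)]
          simp [List.getElem_cons]
  rw [htarget]
  rw [pvInterleave_eq]
  simp only [List.nil_append, List.cons_append, List.flatMap_cons, List.flatMap_append,
    List.flatMap_nil, List.append_nil, pvFlatMap_replicate]
  have hconcat : (1 : Int) :: 0 :: (List.replicate (2 * m) (0 : Int) ++ [1, 0])
      = ((1 : Int) :: 0 :: (List.replicate (2 * m) (0 : Int) ++ [1])) ++ [0] := by
    simp
  rw [hconcat, List.dropLast_concat]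
  unfold pvRow
  rw [show (2 * ((m : Int) + 1) - 1).toNat = 2 * m + 1 by omega, List.replicate_succ]
  simp

theorem pvRow_one : pvRow 1 = [1, 0, 1] := by decide

theorem pvLoop_inv (m : Nat) :
    (PySem.List.pyRange 2 (2 + (m : Int)) 1).foldl (fun tri i =>
        tri ++ [pvStepRow (tri.getD (i - 1).toNat []) i]) [[0, 1, 0], [1, 0, 1]]
      = [0, 1, 0] :: (PySem.List.pyRange 1 (2 + (m : Int)) 1).map pvRow := by
  induction m with
  | zero =>
    rw [PySem.List.pyRange_one_eq_nil (by omega)]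
    rw [show ((2 : Int) + ((0 : Nat) : Int)) = 1 + 1 by omega, PySem.List.pyRange_one_singleton]
    simp [pvRow_one]
  | succ m ih =>
    have hsplit : PySem.List.pyRange 2 (2 + ((m + 1 : Nat) : Int)) 1
        = PySem.List.pyRange 2 (2 + (m : Int)) 1 ++ [2 + (m : Int)] := by
      rw [show ((2 : Int) + ((m + 1 : Nat) : Int)) = (2 + (m : Int)) + 1 by push_cast; ring]
      exact PySem.List.pyRange_one_succ_right (by omega)
    rw [hsplit, List.foldl_append, ih]
    simp only [List.foldl_cons, List.foldl_nil]
    have hlen : (PySem.List.pyRange 1 (2 + (m : Int)) 1).length = m + 1 := by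
      rw [PySem.List.length_pyRange_one]
      omega
    have hprev : (([0, 1, 0] : List Int) ::
        (PySem.List.pyRange 1 (2 + (m : Int)) 1).map pvRow).getD ((2 : Int) + (m : Int) - 1).toNat []
        = pvRow (1 + (m : Int)) := by
      rw [show ((2 : Int) + (m : Int) - 1).toNat = m + 1 by omega, List.getD_cons_succ]
      rw [List.getD_eq_getElem _ _ (by simp [hlen])]
      rw [List.getElem_map]
      congr 1
      rw [PySem.List.getElem_pyRange_one]
    rw [hprev, pvStepRow_eq _ _ (by omega) (pvOddZero_pvRow _ (by omega))]
    have hsplit2 : PySem.List.pyRange 1 (2 + ((m + 1 : Nat) : Int)) 1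
        = PySem.List.pyRange 1 (2 + (m : Int)) 1 ++ [2 + (m : Int)] := by
      rw [show ((2 : Int) + ((m + 1 : Nat) : Int)) = (2 + (m : Int)) + 1 by push_cast; ring]
      exact PySem.List.pyRange_one_succ_right (by omega)
    rw [hsplit2, List.map_append]
    simp

-- ===== VERDICT (by name: the statement is the Claim_ definition above) =====
theorem modified_pascal_matrix_spec : Claim_equal_modified_pascal_matrix := by
  unfold Claim_equal_modified_pascal_matrix
  intro n _
  unfold Spec_modified_pascal_matrix
  by_cases h0 : n ≤ 0
  · simp [modified_pascal_matrix, modified_pascal_matrix_alt, h0]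
  · by_cases h1 : n = 1
    · subst h1
      decide
    · have h2 : 2 ≤ n := by omega
      have hA : modified_pascal_matrix n
          = (PySem.List.pyRange 2 n 1).foldl (fun tri i =>
              tri ++ [pvStepRow (tri.getD (i - 1).toNat []) i]) [[0, 1, 0], [1, 0, 1]] := by
        simp [modified_pascal_matrix, h0, show (1 : Int) ≤ n by omega, h2]
      have hB : modified_pascal_matrix_alt n
          = [[0, 1, 0], [1, 0, 1]] ++ (PySem.List.pyRange 2 n 1).map pvRow := by
        simp [modified_pascal_matrix_alt, h0, h2]
      rw [hA, hB]
      obtain ⟨m, rfl⟩ : ∃ m : Nat, n = 2 + (m : Int) := ⟨(n - 2).toNat, by omega⟩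
      rw [pvLoop_inv m]
      rw [PySem.List.pyRange_one_cons (by omega : (1 : Int) < 2 + (m : Int)),
        show (1 : Int) + 1 = 2 from rfl]
      simp [pvRow_one]
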